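-- pv_equiv track=rewrite | github.com/potatoCompletion/py-algorithm-study | memo.py | solution
-- ===== SOURCE A (Python) =====
-- from itertools import combinations
--
-- def solution(arr):
--     answer = 0
--     comb_array = []
--     for i in range(len(arr)):
--         comb_array.append(i)
--
--     for i in range(1, len(arr)):
--         arr_a, arr_b = arr[i:], arr[:i]
--         a_sum, b_sum = 0, 0
--         for a_num in arr_a:
--             a_sum += a_num
--         for b_num in arr_b:
--             b_sum += b_num
--         if a_sum == b_sum:
--             answer += 1
--
--     comb_list = list(combinations(comb_array, 2))
--
--     for a, b in comb_list:
--         temp_array = arr.copy()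
--         temp_array[a], temp_array[b] = temp_array[b], temp_array[a]
--
--         for i in range(1, len(arr)):
--             arr_a, arr_b = temp_array[i:], temp_array[:i]
--             a_sum, b_sum = 0, 0
--             for a_num in arr_a:
--                 a_sum += a_num
--             for b_num in arr_b:
--                 b_sum += b_num
--             if a_sum == b_sum:
--                 answer += 1
--
--     return answer
-- ===== SOURCE B (Python) =====
-- def solution(arr):
--     # Prefix sums + swap-effect decomposition: no temporary arrays, no slice re-summing.
--     n = len(arr)
--     prefix = [0]
--     p = 0
--     for x in arr:
--         p += x
--         prefix.append(p)
--     s = p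
--     answer = 0
--     for i in range(1, n):
--         if 2 * prefix[i] == s:
--             answer += 1
--     for a in range(n):
--         for b in range(a + 1, n):
--             d = arr[b] - arr[a]
--             for i in range(1, n):
--                 q = prefix[i] + (d if a < i <= b else 0)
--                 if 2 * q == s:
--                     answer += 1
--     return answer
-- ===== Notes on version B (the rewrite author's own statement) =====
-- stated objective: faster
-- what changed: Computes prefix sums once and expresses each swapped array's split balance as the original prefix sum plus a delta on the straddled window, removing the per-pair array copy and the per-split slice re-summing.
import Mathlib
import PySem

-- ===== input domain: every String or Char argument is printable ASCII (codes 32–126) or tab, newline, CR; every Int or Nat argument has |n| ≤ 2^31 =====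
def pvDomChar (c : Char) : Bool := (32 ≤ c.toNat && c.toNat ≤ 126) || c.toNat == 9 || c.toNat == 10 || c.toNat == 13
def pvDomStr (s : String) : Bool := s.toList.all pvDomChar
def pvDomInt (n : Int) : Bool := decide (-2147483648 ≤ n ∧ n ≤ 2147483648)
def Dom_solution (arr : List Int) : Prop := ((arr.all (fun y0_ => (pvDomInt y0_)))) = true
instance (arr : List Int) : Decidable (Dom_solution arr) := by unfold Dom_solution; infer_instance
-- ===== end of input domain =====

-- B replaces A's per-pair array copy and per-split slice re-summing by one prefix-sum pass plus a
-- swap-delta formula (objective: faster; A is O(n^4), B is O(n^3)).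

-- ===== PORT A =====
-- 'for a, b in comb_list' unpacks the length-2 tuples itertools.combinations yields;
-- ported as indexing pair[0] / pair[1] (exact: every element of combinations(_, 2) has length 2).
def solution (arr : List Int) : Int :=
  let n : Int := (arr.length : Int)
  let combArray : List Int := (PySem.List.pyRange 0 n 1).foldl (fun acc i => acc ++ [i]) []
  let answer : Int := 0
  let answer := (PySem.List.pyRange 1 n 1).foldl (fun answer i =>
    let arrA := PySem.List.slice arr (some i) none
    let arrB := PySem.List.slice arr none (some i)
    let aSum := arrA.foldl (fun s x => s + x) 0
    let bSum := arrB.foldl (fun s x => s + x) 0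
    if aSum = bSum then answer + 1 else answer) answer
  let combList := PySem.List.combinations combArray 2
  combList.foldl (fun answer pair =>
    let a := PySem.List.pyGetD pair 0 0
    let b := PySem.List.pyGetD pair 1 0
    let temp1 := PySem.List.pySetD arr a (PySem.List.pyGetD arr b 0)
    let tempArray := PySem.List.pySetD temp1 b (PySem.List.pyGetD arr a 0)
    (PySem.List.pyRange 1 n 1).foldl (fun answer i =>
      let arrA := PySem.List.slice tempArray (some i) none
      let arrB := PySem.List.slice tempArray none (some i)
      let aSum := arrA.foldl (fun s x => s + x) 0
      let bSum := arrB.foldl (fun s x => s + x) 0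
      if aSum = bSum then answer + 1 else answer) answer) answer

-- ===== PORT B =====
def solution_alt (arr : List Int) : Int :=
  let n : Int := (arr.length : Int)
  let pp : List Int × Int :=
    arr.foldl (fun (st : List Int × Int) x => (st.1 ++ [st.2 + x], st.2 + x)) ([0], 0)
  let pre := pp.1
  let s := pp.2
  let answer : Int := (PySem.List.pyRange 1 n 1).foldl (fun answer i =>
    if 2 * PySem.List.pyGetD pre i 0 = s then answer + 1 else answer) 0
  (PySem.List.pyRange 0 n 1).foldl (fun answer a =>
    (PySem.List.pyRange (a + 1) n 1).foldl (fun answer b =>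
      let d := PySem.List.pyGetD arr b 0 - PySem.List.pyGetD arr a 0
      (PySem.List.pyRange 1 n 1).foldl (fun answer i =>
        let q := PySem.List.pyGetD pre i 0 + (if a < i ∧ i ≤ b then d else 0)
        if 2 * q = s then answer + 1 else answer) answer) answer) answer

-- ===== PRECONDITION & SPEC =====
def Spec_solution (arr : List Int) (out : Int) : Prop := out = solution_alt arr
instance (arr : List Int) (out : Int) : Decidable (Spec_solution arr out) := by unfold Spec_solution; infer_instance

-- ===== CLAIM (what is proved, stated in full; the proofs are below) =====
def Claim_equal_solution : Prop := ∀ (arr : List Int), Dom_solution arr → Spec_solution arr (solution arr)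

-- ===== LEMMAS AND PROOFS =====

-- running prefix sums: psList p l = [p + l[0], p + l[0] + l[1], …]
def psList (p : Int) : List Int → List Int
  | [] => []
  | x :: l => (p + x) :: psList (p + x) l

lemma psList_length : ∀ (l : List Int) (p : Int), (psList p l).length = l.length := by
  intro l
  induction l with
  | nil => intro p; rfl
  | cons x t ih => intro p; simp [psList, ih]

lemma foldB : ∀ (l : List Int) (acc : List Int) (p : Int),
    List.foldl (fun (st : List Int × Int) x => (st.1 ++ [st.2 + x], st.2 + x)) (acc, p) l
      = (acc ++ psList p l, p + l.sum) := by
  intro l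
  induction l with
  | nil => intro acc p; simp [psList]
  | cons x t ih =>
    intro acc p
    simp only [List.foldl_cons]
    rw [ih]
    simp [psList, List.append_assoc, add_assoc]

lemma psList_getElem? : ∀ (l : List Int) (p : Int) (k : Nat), k < l.length →
    (psList p l)[k]? = some (p + (l.take (k + 1)).sum) := by
  intro l
  induction l with
  | nil => intro p k hk; simp at hk
  | cons x t ih =>
    intro p k hk
    cases k with
    | zero =>
      simp only [psList, List.getElem?_cons_zero, List.take_succ_cons, List.take_zero,
        List.sum_cons, List.sum_nil, Option.some.injEq]
      ring
    | succ k =>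
      have h := ih (p + x) k (by simpa using hk)
      simp only [psList, List.getElem?_cons_succ, h, List.take_succ_cons, List.sum_cons,
        Option.some.injEq]
      ring

lemma prefix_get (arr : List Int) (i : Int) (h1 : 1 ≤ i) (h2 : i ≤ (arr.length : Int)) :
    PySem.List.pyGetD ([0] ++ psList 0 arr) i 0 = (arr.take i.toNat).sum := by
  have hlen : (([(0:Int)] ++ psList 0 arr)).length = arr.length + 1 := by
    simp [psList_length]
  rw [PySem.List.pyGetD_eq_getElem (i := i) ([(0:Int)] ++ psList 0 arr) 0 (by omega)
    (by rw [hlen]; push_cast; omega)]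
  rw [List.getElem_append_right (by simp; omega)]
  have hg := psList_getElem? arr 0 (i.toNat - 1) (by omega)
  rw [show i.toNat - 1 + 1 = i.toNat from by omega, zero_add] at hg
  have h3 : (psList (0:Int) arr)[i.toNat - 1]? =
      some ((psList (0:Int) arr)[i.toNat - 1]'(by rw [psList_length]; omega)) :=
    List.getElem?_eq_getElem _
  rw [h3] at hg
  simpa using Option.some.inj hg

lemma foldl_add_id (l : List Int) : l.foldl (fun s x => s + x) 0 = l.sum := by
  simpa using PySem.List.foldl_add (l := l) (g := fun x => x) (a := 0)

lemma condA_iff (t : List Int) (i : Int) (h : 0 ≤ i) :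
    ((PySem.List.slice t (some i) none).foldl (fun s x => s + x) 0
      = (PySem.List.slice t none (some i)).foldl (fun s x => s + x) 0)
      ↔ (2 * (t.take i.toNat).sum = t.sum) := by
  rw [PySem.List.slice_from t h, PySem.List.slice_to t h, foldl_add_id, foldl_add_id]
  have hsplit : (t.take i.toNat).sum + (t.drop i.toNat).sum = t.sum := by
    rw [← List.sum_append, List.take_append_drop]
  constructor <;> intro hh <;> linarith

lemma swap_sum_take (l : List Int) (a b : Nat) (hab : a < b) (hb : b < l.length) (i : Nat) :
    (((l.set a (l[b]'hb)).set b (l[a]'(Nat.lt_trans hab hb))).take i).sum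
      = (l.take i).sum + (if a < i ∧ i ≤ b then l[b]'hb - l[a]'(Nat.lt_trans hab hb) else 0) := by
  rw [List.take_set, List.take_set]
  by_cases h1 : i ≤ a
  · rw [List.set_eq_of_length_le (by simp [List.length_set]; omega),
      List.set_eq_of_length_le (by simp; omega), if_neg (by omega)]
    simp
  · by_cases h2 : i ≤ b
    · rw [List.set_eq_of_length_le (by simp [List.length_set]; omega)]
      rw [List.sum_set', dif_pos (show a < ((l.take i).length) from by simp; omega)]
      rw [List.getElem_take, if_pos (by omega)]
      ring
    · rw [List.sum_set',
        dif_pos (show b < (((l.take i).set a (l[b]'hb)).length) from by simp; omega)]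
      rw [List.getElem_set_ne (by omega), List.getElem_take]
      rw [List.sum_set', dif_pos (show a < ((l.take i).length) from by simp; omega)]
      rw [List.getElem_take, if_neg (by omega)]
      ring

lemma swap_sum (l : List Int) (a b : Nat) (hab : a < b) (hb : b < l.length) :
    ((l.set a (l[b]'hb)).set b (l[a]'(Nat.lt_trans hab hb))).sum = l.sum := by
  have h := swap_sum_take l a b hab hb l.length
  rw [if_neg (by omega)] at h
  simpa [List.take_of_length_le, List.length_set] using h

lemma if_count_congr {c1 c2 : Prop} [Decidable c1] [Decidable c2] (h : c1 ↔ c2) (x : Int) :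
    (if c1 then x + 1 else x) = (if c2 then x + 1 else x) :=
  if_congr h rfl rfl

lemma pyGetD_pair0 (x y d : Int) : PySem.List.pyGetD [x, y] 0 d = x := rfl

lemma pyGetD_pair1 (x y d : Int) : PySem.List.pyGetD [x, y] 1 d = y := rfl

lemma pairs_fold (N : Int) (f : Int → List Int → Int) :
    ∀ (k : Nat) (a init : Int), N = a + k →
    (PySem.List.combinations (PySem.List.pyRange a N 1) 2).foldl f init
      = (PySem.List.pyRange a N 1).foldl
          (fun ans x => (PySem.List.pyRange (x + 1) N 1).foldl (fun ans y => f ans [x, y]) ans) init := by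
  intro k
  induction k with
  | zero =>
    intro a init h
    rw [PySem.List.pyRange_one_eq_nil (by omega)]
    rw [show (2:Nat) = 1 + 1 from rfl, PySem.List.combinations_nil_succ]
    simp
  | succ k ih =>
    intro a init h
    have ha : a < N := by omega
    rw [PySem.List.pyRange_one_cons ha]
    rw [show (2:Nat) = 1 + 1 from rfl, PySem.List.combinations_cons_succ,
      PySem.List.combinations_one]
    rw [List.foldl_append, List.map_map, List.foldl_map]
    rw [List.foldl_cons]
    rw [← show (2:Nat) = 1 + 1 from rfl, ih (a + 1) _ (by omega)]
    simp [Function.comp]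

lemma foldl_congr_init {α : Type} (l : List α) (f g : Int → α → Int) (i1 i2 : Int)
    (hinit : i1 = i2) (hbody : ∀ acc x, x ∈ l → f acc x = g acc x) :
    l.foldl f i1 = l.foldl g i2 := by
  subst hinit
  exact PySem.List.foldl_congr_mem _ _ _ _ hbody

lemma solution_eq (arr : List Int) : solution arr = solution_alt arr := by
  simp only [solution, solution_alt, foldB, PySem.List.foldl_append_singleton,
    List.nil_append, zero_add]
  rw [pairs_fold ((arr.length : Int)) _ arr.length 0 _ (by omega)]
  refine foldl_congr_init _ _ _ _ _ ?_ ?_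
  · -- the two first loops agree
    refine PySem.List.foldl_congr_mem _ _ _ _ ?_
    intro acc i hi
    rw [PySem.List.mem_pyRange_one] at hi
    apply if_count_congr
    rw [condA_iff arr i (by omega), prefix_get arr i (by omega) (by omega)]
  · -- the pair loops agree
    intro acc a ha
    rw [PySem.List.mem_pyRange_one] at ha
    refine PySem.List.foldl_congr_mem _ _ _ _ ?_
    intro acc2 b hb
    rw [PySem.List.mem_pyRange_one] at hb
    simp only [pyGetD_pair0, pyGetD_pair1]
    refine PySem.List.foldl_congr_mem _ _ _ _ ?_
    intro acc3 i hi
    rw [PySem.List.mem_pyRange_one] at hi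
    apply if_count_congr
    rw [PySem.List.pyGetD_eq_getElem (i := b) arr 0 (by omega) (by omega),
      PySem.List.pyGetD_eq_getElem (i := a) arr 0 (by omega) (by omega)]
    rw [PySem.List.pySetD_of_nonneg (i := a) arr _ (by omega)]
    rw [PySem.List.pySetD_of_nonneg (i := b) _ _ (by omega)]
    rw [condA_iff _ i (by omega)]
    rw [swap_sum_take arr a.toNat b.toNat (by omega) (by omega) i.toNat]
    rw [swap_sum arr a.toNat b.toNat (by omega) (by omega)]
    rw [prefix_get arr i (by omega) (by omega)]
    rw [if_congr (show (a.toNat < i.toNat ∧ i.toNat ≤ b.toNat) ↔ (a < i ∧ i ≤ b) from by omega)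
      rfl rfl]

-- ===== VERDICT (by name: the statement is the Claim_ definition above) =====
theorem solution_spec : Claim_equal_solution := by
  intro arr _
  exact solution_eq arr
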